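-- pv_equiv track=rewrite | github.com/mohammadfaiizan/ProjectI | DSA/Problem/Queue_Stack/03_Monotonic_Stack/1504_Count_Submatrices_With_All_Ones.py | _count_subarrays_with_min_height
-- ===== SOURCE A (Python) =====
-- from typing import List
--
-- def _count_subarrays_with_min_height(heights: List[int], min_height: int) -> int:
--     """Count subarrays where all elements >= min_height"""
--     count = 0
--     length = 0
--
--     for height in heights:
--         if height >= min_height:
--             length += 1
--             count += length
--         else:
--             length = 0
--
--     return count
-- ===== SOURCE B (Python) =====
-- def _count_subarrays_with_min_height(heights, min_height):
--     """Count subarrays where all elements >= min_height.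
--
--     Staged computation: collect the positions of the failing elements, frame them
--     with sentinels -1 and len(heights), and sum, for each pair of consecutive
--     boundaries a < b, the (b-a-1)*(b-a)//2 subarrays lying strictly between them.
--     """
--     n = len(heights)
--     boundaries = [-1] + [i for i, h in enumerate(heights) if h < min_height] + [n]
--     return sum((b - a - 1) * (b - a) // 2 for a, b in zip(boundaries, boundaries[1:]))
-- ===== Notes on version B (the rewrite author's own statement) =====
-- stated objective: alternative
-- what changed: Replaces A's stateful single pass (running length/count accumulators) by a staged, stateless computation: first materialise the list of failing positions framed by sentinels -1 and n, then sum (b-a-1)*(b-a)//2 over consecutive boundary pairs via zip.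
import Mathlib
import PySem

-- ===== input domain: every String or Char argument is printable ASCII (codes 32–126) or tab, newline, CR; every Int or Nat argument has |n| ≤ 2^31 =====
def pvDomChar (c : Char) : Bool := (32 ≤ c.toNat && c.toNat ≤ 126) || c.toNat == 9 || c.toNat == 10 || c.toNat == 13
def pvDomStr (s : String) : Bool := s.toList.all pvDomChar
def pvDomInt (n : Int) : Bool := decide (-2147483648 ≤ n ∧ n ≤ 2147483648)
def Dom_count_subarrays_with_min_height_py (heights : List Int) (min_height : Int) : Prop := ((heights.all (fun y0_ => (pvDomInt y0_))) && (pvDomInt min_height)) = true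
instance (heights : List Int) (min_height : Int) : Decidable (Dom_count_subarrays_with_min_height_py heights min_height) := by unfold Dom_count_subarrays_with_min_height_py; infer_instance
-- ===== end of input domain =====

-- B replaces A's stateful single pass by a staged, stateless computation (failing positions framed by sentinels, then a zip over consecutive boundary pairs); alternative decomposition, same O(n) cost.


-- ===== PORT A =====
-- A's for-loop over heights with state (count, length), transliterated as structural recursion.
def csA_go (m : Int) : List Int → Int → Int → Int
  | [], count, _ => count
  | h :: rest, count, length =>
    if h ≥ m then csA_go m rest (count + (length + 1)) (length + 1)
    else csA_go m rest count 0

def count_subarrays_with_min_height_py (heights : List Int) (min_height : Int) : Int :=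
  csA_go min_height heights 0 0

-- ===== PORT B =====
-- B: boundaries = [-1] ++ [i for i,h in enumerate(heights) if h < min_height] ++ [n];
-- result = sum((b-a-1)*(b-a)//2 for a,b in zip(boundaries, boundaries[1:])).
def count_subarrays_with_min_height_py_alt (heights : List Int) (min_height : Int) : Int :=
  let n : Int := heights.length
  let boundaries : List Int :=
    -1 :: ((PySem.List.enumerate heights).filterMap
            (fun p => if p.2 < min_height then some p.1 else none)) ++ [n]
  ((boundaries.zip boundaries.tail).map
      (fun p => PySem.Int.floordiv ((p.2 - p.1 - 1) * (p.2 - p.1)) 2)).sum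

-- ===== PRECONDITION & SPEC =====
def Spec_count_subarrays_with_min_height_py (heights : List Int) (min_height : Int) (out : Int) : Prop := out = count_subarrays_with_min_height_py_alt heights min_height
instance (heights : List Int) (min_height : Int) (out : Int) : Decidable (Spec_count_subarrays_with_min_height_py heights min_height out) := by unfold Spec_count_subarrays_with_min_height_py; infer_instance

-- ===== CLAIM (what is proved, stated in full; the proofs are below) =====
def Claim_equal_count_subarrays_with_min_height_py : Prop := ∀ (heights : List Int) (min_height : Int), Dom_count_subarrays_with_min_height_py heights min_height → Spec_count_subarrays_with_min_height_py heights min_height (count_subarrays_with_min_height_py heights min_height)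

-- ===== LEMMAS AND PROOFS =====

-- triangular number via Python floor division
def tri (l : Int) : Int := PySem.Int.floordiv (l * (l + 1)) 2

theorem tri_mul_two (l : Int) : tri l * 2 = l * (l + 1) := by
  obtain ⟨k, hk⟩ := Int.even_mul_succ_self l
  have : l * (l + 1) = 2 * k := by omega
  simp [tri, this, PySem.Int.floordiv, Int.mul_fdiv_cancel_left _ (by norm_num : (2:Int) ≠ 0)]
  omega

theorem tri_succ (l : Int) : tri (l + 1) = tri l + (l + 1) := by
  have h1 := tri_mul_two l
  have h2 := tri_mul_two (l + 1)
  nlinarith [h1, h2]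

-- proof-side reference: run-length accumulator form
def csRef (m : Int) : List Int → Int → Int → Int
  | [], total, run => total + tri run
  | h :: rest, total, run =>
    if h ≥ m then csRef m rest total (run + 1)
    else csRef m rest (total + tri run) 0

theorem csRef_add (m : Int) (xs : List Int) (t d r : Int) :
    csRef m xs (t + d) r = csRef m xs t r + d := by
  induction xs generalizing t r with
  | nil => simp [csRef]; ring
  | cons h rest ih =>
    simp only [csRef]
    split_ifs with hh
    · exact ih t (r + 1)
    · rw [show t + d + tri r = (t + tri r) + d by ring]
      exact ih _ 0

theorem csA_eq_csRef (m : Int) (xs : List Int) (c l : Int) :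
    csA_go m xs c l = c + csRef m xs 0 l - tri l := by
  induction xs generalizing c l with
  | nil => simp [csA_go, csRef]
  | cons h rest ih =>
    simp only [csA_go, csRef]
    split_ifs with hh
    · rw [ih, tri_succ]; ring
    · rw [ih]
      have hadd := csRef_add m rest 0 (tri l) 0
      have hz : tri 0 = 0 := by decide
      omega

-- proof-side: positions (from offset `off`) of elements < m
def badIdx (m : Int) : List Int → Int → List Int
  | [], _ => []
  | h :: rest, off => if h < m then off :: badIdx m rest (off + 1) else badIdx m rest (off + 1)

theorem filterMap_enumerate_eq_badIdx (m : Int) (xs : List Int) (s : Int) :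
    (PySem.List.enumerate xs s).filterMap
        (fun p => if p.2 < m then some p.1 else none) = badIdx m xs s := by
  induction xs generalizing s with
  | nil => simp [PySem.List.enumerate_nil, badIdx]
  | cons h rest ih =>
    simp only [PySem.List.enumerate_cons, List.filterMap_cons, badIdx]
    split_ifs with hh <;> simp [ih]

-- sum over consecutive pairs of a boundary list
def sumGaps : List Int → Int
  | a :: b :: rest => tri (b - a - 1) + sumGaps (b :: rest)
  | _ => 0

theorem zip_tail_sum_eq_sumGaps (l : List Int) :
    ((l.zip l.tail).map
        (fun p => PySem.Int.floordiv ((p.2 - p.1 - 1) * (p.2 - p.1)) 2)).sum = sumGaps l := by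
  induction l with
  | nil => simp [sumGaps]
  | cons a t ih =>
    cases t with
    | nil => simp [sumGaps]
    | cons b rest =>
      simp only [List.tail_cons, List.zip_cons_cons, List.map_cons, List.sum_cons, sumGaps]
      have : ((List.zip (b :: rest) (b :: rest).tail).map
          (fun p => PySem.Int.floordiv ((p.2 - p.1 - 1) * (p.2 - p.1)) 2)).sum
            = sumGaps (b :: rest) := ih
      simp only [List.tail_cons] at this
      rw [this]
      simp [tri]

theorem sumGaps_eq_csRef (m : Int) (xs : List Int) (a off : Int) :
    sumGaps (a :: badIdx m xs off ++ [off + xs.length]) = csRef m xs 0 (off - a - 1) := by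
  induction xs generalizing a off with
  | nil => simp [badIdx, sumGaps, csRef]
  | cons h rest ih =>
    by_cases hh : h ≥ m
    · have hb : badIdx m (h :: rest) off = badIdx m rest (off + 1) := by
        simp [badIdx]; omega
      rw [hb]
      have := ih a (off + 1)
      simp only [List.length_cons]
      push_cast
      rw [show off + ((rest.length : Int) + 1) = (off + 1) + rest.length by ring]
      rw [this]
      simp only [csRef, if_pos hh]
      congr 1
      ring
    · have hb : badIdx m (h :: rest) off = off :: badIdx m rest (off + 1) := by
        simp [badIdx]; omega
      rw [hb]
      have lhs : sumGaps (a :: (off :: badIdx m rest (off + 1)) ++ [off + (h :: rest).length])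
          = tri (off - a - 1) + sumGaps (off :: badIdx m rest (off + 1) ++ [off + (h :: rest).length]) := by
        simp [sumGaps]
      rw [lhs]
      have := ih off (off + 1)
      simp only [List.length_cons]
      push_cast
      rw [show off + ((rest.length : Int) + 1) = (off + 1) + rest.length by ring]
      rw [show (off + 1) - off - 1 = (0:Int) by ring] at this
      rw [this]
      simp only [csRef, if_neg hh]
      have hz : tri 0 = 0 := by decide
      have := csRef_add m rest 0 (tri (off - a - 1)) 0
      omega

-- ===== VERDICT (by name: the statement is the Claim_ definition above) =====
theorem count_subarrays_with_min_height_py_spec : Claim_equal_count_subarrays_with_min_height_py := by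
  intro heights min_height _
  unfold Spec_count_subarrays_with_min_height_py
  unfold count_subarrays_with_min_height_py count_subarrays_with_min_height_py_alt
  simp only []
  rw [filterMap_enumerate_eq_badIdx, zip_tail_sum_eq_sumGaps]
  have h := sumGaps_eq_csRef min_height heights (-1) 0
  rw [show (0:Int) - (-1) - 1 = 0 by ring] at h
  rw [show (0:Int) + (heights.length : Int) = (heights.length : Int) by ring] at h
  rw [h, csA_eq_csRef]
  have hz : tri 0 = 0 := by decide
  omega
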